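-- pv_equiv track=rewrite | github.com/anthony-callender/navy-federal-tracker | email_parser.py | _is_transaction_alert
-- ===== SOURCE A (Python) =====
-- def _is_transaction_alert(subject: str, body: str) -> bool:
--     """Check if email is a transaction alert vs informational."""
--     transaction_indicators = [
--         "transaction", "purchase", "deposit", "withdrawal",
--         "payment", "debit", "credit", "charge", "atm",
--         "$"  # Most transaction alerts have a dollar amount
--     ]
--
--     text = (subject + " " + body).lower()
--     return any(indicator in text for indicator in transaction_indicators)
-- ===== SOURCE B (Python) =====
-- def _is_transaction_alert(subject: str, body: str) -> bool:
--     """Check if email is a transaction alert vs informational."""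
--     transaction_indicators = (
--         "transaction", "purchase", "deposit", "withdrawal",
--         "payment", "debit", "credit", "charge", "atm",
--         "$"  # Most transaction alerts have a dollar amount
--     )
--
--     text = (subject + " " + body).lower()
--     # single left-to-right pass: at each position, does any indicator start here?
--     for i in range(len(text)):
--         if text.startswith(transaction_indicators, i):
--             return True
--     return False
-- ===== Notes on version B (the rewrite author's own statement) =====
-- stated objective: alternative
-- what changed: Instead of running a separate full substring scan per indicator ('in' once per keyword), B makes a single left-to-right pass over the text and at each position checks whether any indicator starts there via str.startswith with a tuple.
import Mathlib
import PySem

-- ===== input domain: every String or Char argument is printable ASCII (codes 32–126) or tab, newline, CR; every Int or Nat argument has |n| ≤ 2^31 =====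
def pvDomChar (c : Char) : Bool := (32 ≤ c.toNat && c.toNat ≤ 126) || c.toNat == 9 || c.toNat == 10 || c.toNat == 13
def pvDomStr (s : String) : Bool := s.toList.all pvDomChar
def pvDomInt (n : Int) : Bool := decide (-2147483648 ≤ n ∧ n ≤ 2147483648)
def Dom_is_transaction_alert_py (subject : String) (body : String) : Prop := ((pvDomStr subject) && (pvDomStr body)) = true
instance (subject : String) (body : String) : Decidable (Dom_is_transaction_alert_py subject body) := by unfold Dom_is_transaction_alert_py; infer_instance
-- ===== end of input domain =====

-- B replaces A's per-indicator full substring scans by one left-to-right pass testing each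
-- position with startswith against all indicators (objective: alternative, same result).

-- ===== PORT A =====
def pvIndicators : List (List Char) :=
  ["transaction", "purchase", "deposit", "withdrawal",
   "payment", "debit", "credit", "charge", "atm", "$"].map String.toList

def is_transaction_alert_py (subject : String) (body : String) : Bool :=
  let text := PySem.Chars.lower (subject.toList ++ ' ' :: body.toList)
  pvIndicators.any (fun ind => PySem.Chars.isIn ind text)

-- ===== PORT B =====
-- the loop 'for i in range(len(text)): if text.startswith(indicators, i)' as suffix recursion
def pvScan (inds : List (List Char)) : List Char → Bool
  | [] => false
  | c :: rest =>
    if inds.any (fun ind => PySem.Chars.startswith (c :: rest) ind) then true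
    else pvScan inds rest

def is_transaction_alert_py_alt (subject : String) (body : String) : Bool :=
  let text := PySem.Chars.lower (subject.toList ++ ' ' :: body.toList)
  pvScan pvIndicators text

-- ===== PRECONDITION & SPEC =====
def Spec_is_transaction_alert_py (subject : String) (body : String) (out : Bool) : Prop := out = is_transaction_alert_py_alt subject body
instance (subject : String) (body : String) (out : Bool) : Decidable (Spec_is_transaction_alert_py subject body out) := by unfold Spec_is_transaction_alert_py; infer_instance

-- ===== CLAIM (what is proved, stated in full; the proofs are below) =====
def Claim_equal_is_transaction_alert_py : Prop := ∀ (subject : String) (body : String), Dom_is_transaction_alert_py subject body → Spec_is_transaction_alert_py subject body (is_transaction_alert_py subject body)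

-- ===== LEMMAS AND PROOFS =====

-- 'ind in (c :: rest)' splits into 'starts here' or 'ind in rest'
theorem pv_isIn_cons (ind : List Char) (c : Char) (rest : List Char) :
    PySem.Chars.isIn ind (c :: rest)
      = (PySem.Chars.startswith (c :: rest) ind || PySem.Chars.isIn ind rest) := by
  rw [Bool.eq_iff_iff]
  simp [PySem.Chars.isIn_iff_infix, PySem.Chars.startswith_iff, List.infix_cons_iff]

-- for nonempty indicators, the single scan equals the any-of-isIn test
theorem pv_scan_eq (inds : List (List Char)) (h : ∀ ind ∈ inds, ind ≠ []) :
    ∀ t : List Char, pvScan inds t = inds.any (fun ind => PySem.Chars.isIn ind t) := by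
  intro t
  induction t with
  | nil =>
    simp only [pvScan]
    symm
    rw [List.any_eq_false]
    intro ind hi
    rw [PySem.Chars.isIn_iff_infix]
    intro hinf
    exact h ind hi (List.eq_nil_of_infix_nil hinf)
  | cons c rest ih =>
    simp only [pvScan, ih]
    cases hx : inds.any (fun ind => PySem.Chars.startswith (c :: rest) ind) with
    | true =>
      simp only [if_true]
      symm
      rw [List.any_eq_true] at hx ⊢
      obtain ⟨ind, hi, hs⟩ := hx
      exact ⟨ind, hi, by rw [pv_isIn_cons, hs, Bool.true_or]⟩
    | false =>
      rw [if_neg (by simp)]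
      rw [Bool.eq_iff_iff, List.any_eq_true, List.any_eq_true]
      constructor
      · rintro ⟨ind, hi, hv⟩
        exact ⟨ind, hi, by rw [pv_isIn_cons, hv, Bool.or_true]⟩
      · rintro ⟨ind, hi, hv⟩
        rw [pv_isIn_cons] at hv
        have hs : PySem.Chars.startswith (c :: rest) ind = false := by
          simpa using List.any_eq_false.mp hx ind hi
        rw [hs, Bool.false_or] at hv
        exact ⟨ind, hi, hv⟩

-- ===== VERDICT (by name: the statement is the Claim_ definition above) =====
theorem is_transaction_alert_py_spec : Claim_equal_is_transaction_alert_py := by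
  intro subject body _
  unfold Spec_is_transaction_alert_py is_transaction_alert_py is_transaction_alert_py_alt
  rw [pv_scan_eq pvIndicators (by decide)]
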